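-- pv_equiv track=rewrite | github.com/trngnneeee/Hashiwokakero_puzzle | Source/main.py | check_connect
-- ===== SOURCE A (Python) =====
-- def check_connect(solution, islands):
--     """
--     Check all the island is connect using DFS.
--     """
--     # Init adjacency list
--     graph = {i: [] for i in islands.keys()}
--     for (i, j), count in solution.items():
--         if count > 0:
--             graph[i].append(j)
--             graph[j].append(i)
--     visited = set()
--
--     def dfs(u):
--         visited.add(u)
--         for v in graph[u]:
--             if v not in visited:
--                 dfs(v)
--
--     start = min(islands.keys())
--     dfs(start)
--     return len(visited) == len(islands)
-- ===== SOURCE B (Python) =====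
-- def check_connect(solution, islands):
--     """
--     Check all islands are connected: iterative worklist (explicit stack)
--     over an adjacency map built from the positive-count edge list.
--     """
--     arcs = [ij for ij, c in solution.items() if c > 0]
--     arcs = arcs + [(j, i) for (i, j) in arcs]
--     adj = {}
--     for a, b in arcs:
--         adj.setdefault(a, []).append(b)
--     start = min(islands)
--     seen = {start}
--     stack = [start]
--     while stack:
--         u = stack.pop()
--         for v in adj.get(u, ()):
--             if v not in seen:
--                 seen.add(v)
--                 stack.append(v)
--     return len(seen) == len(islands)
-- ===== Notes on version B (the rewrite author's own statement) =====
-- stated objective: alternative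
-- what changed: Replaces the recursive DFS over a pre-initialised adjacency dict with an iterative worklist (explicit stack) over an adjacency map built from the materialised positive-count arc list, with no recursion and no per-island dict initialisation.
import Mathlib
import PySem

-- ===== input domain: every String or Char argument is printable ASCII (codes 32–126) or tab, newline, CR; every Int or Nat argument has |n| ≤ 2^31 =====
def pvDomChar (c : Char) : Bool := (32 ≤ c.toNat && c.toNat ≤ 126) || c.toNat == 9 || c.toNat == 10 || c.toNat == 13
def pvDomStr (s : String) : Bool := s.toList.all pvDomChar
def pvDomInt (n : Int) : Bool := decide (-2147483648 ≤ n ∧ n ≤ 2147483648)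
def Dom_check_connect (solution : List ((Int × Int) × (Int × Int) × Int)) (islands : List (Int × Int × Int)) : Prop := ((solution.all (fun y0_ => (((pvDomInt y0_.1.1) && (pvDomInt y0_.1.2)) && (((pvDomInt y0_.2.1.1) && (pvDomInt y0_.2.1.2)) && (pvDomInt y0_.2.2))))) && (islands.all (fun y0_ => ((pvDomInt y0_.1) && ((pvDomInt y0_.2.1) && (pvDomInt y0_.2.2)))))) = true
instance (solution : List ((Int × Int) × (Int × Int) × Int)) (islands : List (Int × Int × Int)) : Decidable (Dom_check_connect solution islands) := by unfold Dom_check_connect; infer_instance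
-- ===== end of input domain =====

-- B replaces A's recursive DFS over a pre-initialised adjacency dict by an iterative
-- explicit-stack worklist over an adjacency map built from the materialised arc list
-- (objective: alternative decomposition, same asymptotic cost).

-- ===== PORT A =====
-- input marshalling (the dict convention: islands is a dict (Int×Int) → Int,
-- solution a dict ((Int×Int)×(Int×Int)) → Int, both given as flattened lists)
def pvPairs (islands : List (Int × Int × Int)) : List ((Int × Int) × Int) :=
  islands.map (fun e => ((e.1, e.2.1), e.2.2))

def pvSolPairs (solution : List ((Int × Int) × (Int × Int) × Int)) :
    List (((Int × Int) × (Int × Int)) × Int) :=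
  solution.map (fun e => ((e.1, e.2.1), e.2.2))

-- the nested `def dfs(u)` of A; fuel only realises the recursion (A recurses on
-- unvisited nodes only, so islands.length+1 levels are never exhausted under Pre_)
def pvDfs (g : PySem.Dict (Int × Int) (List (Int × Int))) :
    Nat → (Int × Int) → PySem.Set (Int × Int) → PySem.Set (Int × Int)
  | 0, _, visited => visited
  | fuel + 1, u, visited =>
      (g.getD u []).foldl
        (fun vis v => if vis.contains v then vis else pvDfs g fuel v vis)
        (visited.add u)

def check_connect (solution : List ((Int × Int) × (Int × Int) × Int)) (islands : List (Int × Int × Int)) : Bool :=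
  let islandsD : PySem.Dict (Int × Int) Int := PySem.Dict.ofList (pvPairs islands)
  let solutionD : PySem.Dict ((Int × Int) × (Int × Int)) Int := PySem.Dict.ofList (pvSolPairs solution)
  -- graph = {i: [] for i in islands.keys()}
  let graph0 : PySem.Dict (Int × Int) (List (Int × Int)) :=
    PySem.Dict.ofList (islandsD.keys.map (fun i => (i, ([] : List (Int × Int)))))
  -- for (i, j), count in solution.items(): if count > 0: graph[i].append(j); graph[j].append(i)
  -- (Python raises KeyError on a missing key; excluded by Pre_, modify then inserts instead)
  let graph := solutionD.items.foldl
    (fun g e =>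
      if 0 < e.2 then
        (g.modify e.1.1 [] (fun l => l ++ [e.1.2])).modify e.1.2 [] (fun l => l ++ [e.1.1])
      else g) graph0
  -- start = min(islands.keys())  (lexicographic on pairs; ValueError on empty → Pre_)
  match PySem.List.min2? islandsD.keys (fun k => k.1) (fun k => k.2) with
  | none => false
  | some start =>
      let visited := pvDfs graph (islands.length + 1) start PySem.Set.empty
      decide (visited.length = islandsD.size)

-- ===== PORT B =====
-- the while-stack loop of B; fuel realises the while loop (each pop either ends a
-- branch or adds fresh seen nodes, so 2*islands.length+2 steps suffice under Pre_)
def pvLoop (adj : PySem.Dict (Int × Int) (List (Int × Int))) :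
    Nat → List (Int × Int) → PySem.Set (Int × Int) → PySem.Set (Int × Int)
  | 0, _, seen => seen
  | _ + 1, [], seen => seen
  | fuel + 1, u :: stack, seen =>
      let p := (adj.getD u []).foldl
        (fun (p : List (Int × Int) × PySem.Set (Int × Int)) v =>
          if p.2.contains v then p else (v :: p.1, p.2.add v))
        (stack, seen)
      pvLoop adj fuel p.1 p.2

def check_connect_alt (solution : List ((Int × Int) × (Int × Int) × Int)) (islands : List (Int × Int × Int)) : Bool :=
  -- arcs = [ij for ij, c in solution.items() if c > 0]; arcs += [(j, i) for (i, j) in arcs]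
  let arcs0 := ((PySem.Dict.ofList (pvSolPairs solution)).items.filter
      (fun e => 0 < e.2)).map (fun e => e.1)
  let arcs := arcs0 ++ arcs0.map (fun e => (e.2, e.1))
  -- adj = {}; for a, b in arcs: adj.setdefault(a, []).append(b)
  let adj := arcs.foldl (fun d p => d.modify p.1 [] (fun l => l ++ [p.2])) PySem.Dict.empty
  let keys := PySem.List.dedup (islands.map (fun e => (e.1, e.2.1)))
  -- start = min(islands)
  match PySem.List.min2? keys (fun k => k.1) (fun k => k.2) with
  | none => false
  | some start =>
      let seen := pvLoop adj (2 * islands.length + 2) [start] (PySem.Set.add PySem.Set.empty start)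
      decide (seen.length = keys.length)

-- ===== PRECONDITION & SPEC =====
-- Pre_ excludes exactly the inputs where A raises: empty islands (ValueError from min)
-- and a positive-count edge with an endpoint that is not an island key (KeyError).
def Pre_check_connect (solution : List ((Int × Int) × (Int × Int) × Int)) (islands : List (Int × Int × Int)) : Prop :=
  islands ≠ [] ∧
  ∀ e ∈ (PySem.Dict.ofList (pvSolPairs solution)).items, 0 < e.2 →
    e.1.1 ∈ islands.map (fun t => (t.1, t.2.1)) ∧ e.1.2 ∈ islands.map (fun t => (t.1, t.2.1))
instance (solution : List ((Int × Int) × (Int × Int) × Int)) (islands : List (Int × Int × Int)) : Decidable (Pre_check_connect solution islands) := by unfold Pre_check_connect; infer_instance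

def pvWitness_check_connect : (List ((Int × Int) × (Int × Int) × Int)) × (List (Int × Int × Int)) :=
  ([((0, 0), (0, 1), 1)], [(0, 0, 1), (0, 1, 2)])

def Spec_check_connect (solution : List ((Int × Int) × (Int × Int) × Int)) (islands : List (Int × Int × Int)) (out : Bool) : Prop := out = check_connect_alt solution islands
instance (solution : List ((Int × Int) × (Int × Int) × Int)) (islands : List (Int × Int × Int)) (out : Bool) : Decidable (Spec_check_connect solution islands out) := by unfold Spec_check_connect; infer_instance

-- ===== CLAIM (what is proved, stated in full; the proofs are below) =====
def Claim_equal_check_connect : Prop := ∀ (solution : List ((Int × Int) × (Int × Int) × Int)) (islands : List (Int × Int × Int)), Dom_check_connect solution islands → Pre_check_connect solution islands → Spec_check_connect solution islands (check_connect solution islands)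


-- ===== LEMMAS AND PROOFS =====

-- the (symmetric) edge relation both programs traverse
def pvNbrSpec (items : List (((Int × Int) × (Int × Int)) × Int)) (u v : Int × Int) : Prop :=
  ∃ e ∈ items, 0 < e.2 ∧ ((e.1.1 = u ∧ e.1.2 = v) ∨ (e.1.2 = u ∧ e.1.1 = v))

-- the neighbour relation as each port stores it
def pvR (g : PySem.Dict (Int × Int) (List (Int × Int))) (u v : Int × Int) : Prop :=
  v ∈ g.getD u []

def pvPartners (u : Int × Int) (l : List (((Int × Int) × (Int × Int)) × Int)) : List (Int × Int) :=
  l.flatMap (fun e => if 0 < e.2 then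
    ((if e.1.1 = u then [e.1.2] else []) ++ (if e.1.2 = u then [e.1.1] else [])) else [])

theorem pvMin2?_mem {α : Type} (xs : List α) (k1 k2 : α → Int) (m : α)
    (h : PySem.List.min2? xs k1 k2 = some m) : m ∈ xs := by
  unfold PySem.List.min2? at h
  suffices H : ∀ (l : List α) (acc : Option α),
      (l.foldl (fun acc x =>
        match acc with
        | none => some x
        | some m0 =>
          if (decide (k1 x < k1 m0) || !decide (k1 m0 < k1 x) && decide (k2 x < k2 m0)) = true
          then some x else some m0) acc) = some m → acc = some m ∨ m ∈ l by
    rcases H xs none h with h' | h'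
    · simp at h'
    · exact h'
  intro l
  induction l with
  | nil => intro acc h; exact Or.inl h
  | cons x t ih =>
    intro acc h
    rcases ih _ h with h' | h'
    · cases acc with
      | none => simp at h'; right; simp [h']
      | some m0 =>
        simp only at h'
        split at h'
        · right; simp at h'; simp [h']
        · left; simpa using h'
    · right; exact List.mem_cons_of_mem _ h'

theorem pvFoldlPres {σ β : Type} (f : σ → β → σ) (P : σ → Prop)
    (hstep : ∀ a x, P a → P (f a x)) :
    ∀ (l : List β) (a : σ), P a → P (l.foldl f a) := by
  intro l
  induction l with
  | nil => intro a h; exact h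
  | cons x t ih => intro a h; exact ih _ (hstep a x h)

-- one dfs step preserves any membership/nodup-style property that Set.add and
-- recursive calls preserve … specialized helper:
theorem pvDfs_step_pres (g : PySem.Dict (Int × Int) (List (Int × Int))) (f : Nat)
    (P : PySem.Set (Int × Int) → Prop)
    (hrec : ∀ x a, P a → P (pvDfs g f x a)) :
    ∀ (a : PySem.Set (Int × Int)) (x : Int × Int), P a →
      P (if a.contains x then a else pvDfs g f x a) := by
  intro a x h
  by_cases hc : a.contains x
  · rwa [if_pos hc]
  · rw [if_neg hc]; exact hrec x a h

theorem pvDfs_subset (g : PySem.Dict (Int × Int) (List (Int × Int))) :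
    ∀ (fuel : Nat) (u : Int × Int) (vis : PySem.Set (Int × Int)) (w : Int × Int),
      w ∈ vis → w ∈ pvDfs g fuel u vis := by
  intro fuel
  induction fuel with
  | zero => intro u vis w h; simpa [pvDfs] using h
  | succ f ih =>
    intro u vis w h
    simp only [pvDfs]
    refine pvFoldlPres _ (fun s => w ∈ s) ?_ _ _ ?_
    · exact pvDfs_step_pres g f _ (fun x a ha => ih x a w ha)
    · show w ∈ vis.add u
      rw [PySem.Set.mem_add]; exact Or.inl h

theorem pvDfs_mem_self (g : PySem.Dict (Int × Int) (List (Int × Int)))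
    (fuel : Nat) (u : Int × Int) (vis : PySem.Set (Int × Int)) (hf : 0 < fuel) :
    u ∈ pvDfs g fuel u vis := by
  cases fuel with
  | zero => omega
  | succ f =>
    simp only [pvDfs]
    refine pvFoldlPres _ (fun s => u ∈ s) ?_ _ _ ?_
    · exact pvDfs_step_pres g f _ (fun x a ha => pvDfs_subset g f x a u ha)
    · show u ∈ vis.add u
      rw [PySem.Set.mem_add]; exact Or.inr rfl

theorem pvDfs_nodup (g : PySem.Dict (Int × Int) (List (Int × Int))) :
    ∀ (fuel : Nat) (u : Int × Int) (vis : PySem.Set (Int × Int)),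
      vis.Nodup → (pvDfs g fuel u vis).Nodup := by
  intro fuel
  induction fuel with
  | zero => intro u vis h; simpa [pvDfs] using h
  | succ f ih =>
    intro u vis h
    simp only [pvDfs]
    refine pvFoldlPres _ (fun s : PySem.Set (Int × Int) => s.Nodup) ?_ _ _
      (PySem.Set.nodup_add vis u h)
    exact pvDfs_step_pres g f _ (fun x a ha => ih x a ha)

theorem pvDfs_sound (g : PySem.Dict (Int × Int) (List (Int × Int))) :
    ∀ (fuel : Nat) (u : Int × Int) (vis : PySem.Set (Int × Int)) (w : Int × Int),
      w ∈ pvDfs g fuel u vis → w ∈ vis ∨ Relation.ReflTransGen (pvR g) u w := by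
  intro fuel
  induction fuel with
  | zero => intro u vis w h; exact Or.inl (by simpa [pvDfs] using h)
  | succ f ih =>
    intro u vis w h
    simp only [pvDfs] at h
    have Hfold : ∀ (l : List (Int × Int)) (acc : PySem.Set (Int × Int)),
        (∀ v ∈ l, pvR g u v) →
        (∀ x ∈ acc, x ∈ vis ∨ Relation.ReflTransGen (pvR g) u x) →
        ∀ x ∈ l.foldl (fun vis v => if vis.contains v then vis else pvDfs g f v vis) acc,
          x ∈ vis ∨ Relation.ReflTransGen (pvR g) u x := by
      intro l
      induction l with
      | nil => intro acc _ hacc x hx; exact hacc x hx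
      | cons v t iht =>
        intro acc hl hacc x hx
        rw [List.foldl_cons] at hx
        by_cases hc : acc.contains v
        · rw [if_pos hc] at hx
          exact iht acc (fun v' hv' => hl v' (List.mem_cons_of_mem _ hv')) hacc x hx
        · rw [if_neg hc] at hx
          refine iht (pvDfs g f v acc) (fun v' hv' => hl v' (List.mem_cons_of_mem _ hv')) ?_ x hx
          intro y hy
          rcases ih v acc y hy with hy' | hy'
          · exact hacc y hy'
          · exact Or.inr (Relation.ReflTransGen.trans
              (Relation.ReflTransGen.single (hl v List.mem_cons_self)) hy')
    refine Hfold _ _ (fun v hv => hv) ?_ w h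
    intro x hx
    rw [PySem.Set.mem_add] at hx
    rcases hx with hx | hx
    · exact Or.inl hx
    · exact Or.inr (hx ▸ Relation.ReflTransGen.refl)

theorem pvDfs_fold_closed (g : PySem.Dict (Int × Int) (List (Int × Int)))
    (nodes : Finset (Int × Int)) (f : Nat)
    (hnbr : ∀ a b, pvR g a b → b ∈ nodes)
    (IH : ∀ (u : Int × Int) (vis : PySem.Set (Int × Int)), u ∈ nodes → u ∉ vis →
        (nodes \ insert u vis.toFinset).card < f →
        ∀ w ∈ pvDfs g f u vis, w ∈ vis ∨ (∀ v, pvR g w v → v ∈ pvDfs g f u vis)) :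
    ∀ (l : List (Int × Int)) (u : Int × Int) (vis acc : PySem.Set (Int × Int)),
      (∀ v ∈ l, pvR g u v) → u ∈ nodes → u ∉ vis →
      (∀ x ∈ vis, x ∈ acc) → u ∈ acc →
      (nodes \ insert u vis.toFinset).card ≤ f →
      (∀ w ∈ acc, w ∈ vis ∨ w = u ∨ (∀ v, pvR g w v → v ∈ acc)) →
      (∀ v, pvR g u v → v ∈ l ∨ v ∈ acc) →
      ∀ w ∈ l.foldl (fun vis v => if vis.contains v then vis else pvDfs g f v vis) acc,
        w ∈ vis ∨ (∀ v, pvR g w v →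
          v ∈ l.foldl (fun vis v => if vis.contains v then vis else pvDfs g f v vis) acc) := by
  intro l
  induction l with
  | nil =>
    intro u vis acc _ _ _ _ _ _ hinv hout w hw
    simp only [List.foldl_nil] at hw ⊢
    rcases hinv w hw with h | h | h
    · exact Or.inl h
    · subst h
      refine Or.inr (fun v hv => ?_)
      rcases hout v hv with h' | h'
      · simp at h'
      · exact h'
    · exact Or.inr h
  | cons v t iht =>
    intro u vis acc hl hu hvu hvisacc huacc hcard hinv hout w hw
    rw [List.foldl_cons] at hw ⊢
    by_cases hc : acc.contains v
    · rw [if_pos hc] at hw ⊢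
      have hv : v ∈ acc := (PySem.Set.contains_iff acc v).mp hc
      refine iht u vis acc (fun v' hv' => hl v' (List.mem_cons_of_mem _ hv'))
        hu hvu hvisacc huacc hcard hinv ?_ w hw
      intro v' hv'
      rcases hout v' hv' with h' | h'
      · rcases List.mem_cons.mp h' with h'' | h''
        · exact Or.inr (h'' ▸ hv)
        · exact Or.inl h''
      · exact Or.inr h'
    · rw [if_neg hc] at hw ⊢
      have hvacc : v ∉ acc := fun h => hc ((PySem.Set.contains_iff acc v).mpr h)
      have hpvR : pvR g u v := hl v List.mem_cons_self
      have hvnodes : v ∈ nodes := hnbr u v hpvR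
      have hvne : v ≠ u := fun h => hvacc (h ▸ huacc)
      have hvvis : v ∉ vis := fun h => hvacc (hvisacc v h)
      have hcard2 : (nodes \ insert v (List.toFinset acc)).card < f := by
        have hss : nodes \ insert v (List.toFinset acc) ⊂ nodes \ insert u (List.toFinset vis) := by
          rw [Finset.ssubset_iff_of_subset]
          · exact ⟨v, by
              simp only [Finset.mem_sdiff, Finset.mem_insert, List.mem_toFinset]
              exact ⟨⟨hvnodes, by push Not; exact ⟨hvne, hvvis⟩⟩, by simp⟩⟩
          · intro x hx
            simp only [Finset.mem_sdiff, Finset.mem_insert, List.mem_toFinset] at hx ⊢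
            refine ⟨hx.1, ?_⟩
            push Not
            have := hx.2
            push Not at this
            constructor
            · intro h; exact this.2 (h ▸ huacc)
            · intro h; exact this.2 (hvisacc x h)
        calc (nodes \ insert v (List.toFinset acc)).card
            < (nodes \ insert u (List.toFinset vis)).card := Finset.card_lt_card hss
          _ ≤ f := hcard
      have hfpos : 0 < f := by omega
      have hmono : ∀ x ∈ acc, x ∈ pvDfs g f v acc := fun x hx => pvDfs_subset g f v acc x hx
      have hvin : v ∈ pvDfs g f v acc := pvDfs_mem_self g f v acc hfpos
      have hclosed' := IH v acc hvnodes hvacc hcard2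
      refine iht u vis (pvDfs g f v acc) (fun v' hv' => hl v' (List.mem_cons_of_mem _ hv'))
        hu hvu (fun x hx => hmono x (hvisacc x hx)) (hmono u huacc) hcard ?_ ?_ w hw
      · intro x hx
        rcases hclosed' x hx with h' | h'
        · rcases hinv x h' with h'' | h'' | h''
          · exact Or.inl h''
          · exact Or.inr (Or.inl h'')
          · exact Or.inr (Or.inr (fun v' hv' => hmono v' (h'' v' hv')))
        · exact Or.inr (Or.inr h')
      · intro v' hv'
        rcases hout v' hv' with h' | h'
        · rcases List.mem_cons.mp h' with h'' | h''
          · exact Or.inr (h'' ▸ hvin)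
          · exact Or.inl h''
        · exact Or.inr (hmono v' h')

theorem pvDfs_closed (g : PySem.Dict (Int × Int) (List (Int × Int))) (nodes : Finset (Int × Int))
    (hnbr : ∀ a b, pvR g a b → b ∈ nodes) :
    ∀ (fuel : Nat) (u : Int × Int) (vis : PySem.Set (Int × Int)),
      u ∈ nodes → u ∉ vis →
      (nodes \ insert u vis.toFinset).card < fuel →
      ∀ w ∈ pvDfs g fuel u vis, w ∈ vis ∨ (∀ v, pvR g w v → v ∈ pvDfs g fuel u vis) := by
  intro fuel
  induction fuel with
  | zero => intro u vis _ _ hcard; omega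
  | succ f ih =>
    intro u vis hu hvu hcard w hw
    simp only [pvDfs] at hw ⊢
    refine pvDfs_fold_closed g nodes f hnbr ih (g.getD u []) u vis (vis.add u)
      (fun v hv => hv) hu hvu ?_ ?_ (by omega) ?_ ?_ w hw
    · intro x hx; rw [PySem.Set.mem_add]; exact Or.inl hx
    · rw [PySem.Set.mem_add]; exact Or.inr rfl
    · intro x hx
      rw [PySem.Set.mem_add] at hx
      rcases hx with hx | hx
      · exact Or.inl hx
      · exact Or.inr (Or.inl hx)
    · intro v hv; exact Or.inl hv

theorem pvSetAdd_toFinset (s : PySem.Set (Int × Int)) (x : Int × Int) :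
    (s.add x).toFinset = insert x s.toFinset := by
  apply Finset.ext
  intro a
  simp only [List.mem_toFinset, Finset.mem_insert, PySem.Set.mem_add]
  tauto

theorem pvLoop_subset (adj : PySem.Dict (Int × Int) (List (Int × Int))) :
    ∀ (fuel : Nat) (stack : List (Int × Int)) (seen : PySem.Set (Int × Int)) (w : Int × Int),
      w ∈ seen → w ∈ pvLoop adj fuel stack seen := by
  intro fuel
  induction fuel with
  | zero => intro stack seen w h; simpa [pvLoop] using h
  | succ f ih =>
    intro stack seen w h
    cases stack with
    | nil => simpa [pvLoop] using h
    | cons u stack =>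
      simp only [pvLoop]
      apply ih
      refine pvFoldlPres _ (fun p : List (Int × Int) × PySem.Set (Int × Int) => w ∈ p.2) ?_ _ _ h
      intro a x ha
      by_cases hc : a.2.contains x
      · rwa [if_pos hc]
      · rw [if_neg hc]
        show w ∈ a.2.add x
        rw [PySem.Set.mem_add]; exact Or.inl ha

theorem pvLoop_nodup (adj : PySem.Dict (Int × Int) (List (Int × Int))) :
    ∀ (fuel : Nat) (stack : List (Int × Int)) (seen : PySem.Set (Int × Int)),
      seen.Nodup → (pvLoop adj fuel stack seen).Nodup := by
  intro fuel
  induction fuel with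
  | zero => intro stack seen h; simpa [pvLoop] using h
  | succ f ih =>
    intro stack seen h
    cases stack with
    | nil => simpa [pvLoop] using h
    | cons u stack =>
      simp only [pvLoop]
      apply ih
      refine pvFoldlPres _ (fun p : List (Int × Int) × PySem.Set (Int × Int) => p.2.Nodup) ?_ _ _ h
      intro a x ha
      by_cases hc : a.2.contains x
      · rwa [if_pos hc]
      · rw [if_neg hc]
        exact PySem.Set.nodup_add a.2 x ha

theorem pvFoldlPresMem {σ β : Type} (f : σ → β → σ) (P : σ → Prop) (Q : β → Prop)
    (hstep : ∀ a x, Q x → P a → P (f a x)) :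
    ∀ (l : List β), (∀ x ∈ l, Q x) → ∀ (a : σ), P a → P (l.foldl f a) := by
  intro l
  induction l with
  | nil => intro _ a h; exact h
  | cons x t ih =>
    intro hl a h
    exact ih (fun y hy => hl y (List.mem_cons_of_mem _ hy)) _
      (hstep a x (hl x List.mem_cons_self) h)

theorem pvLoop_sound (adj : PySem.Dict (Int × Int) (List (Int × Int))) (start : Int × Int) :
    ∀ (fuel : Nat) (stack : List (Int × Int)) (seen : PySem.Set (Int × Int)),
      (∀ s ∈ stack, Relation.ReflTransGen (pvR adj) start s) →
      (∀ w ∈ seen, Relation.ReflTransGen (pvR adj) start w) →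
      ∀ w ∈ pvLoop adj fuel stack seen, Relation.ReflTransGen (pvR adj) start w := by
  intro fuel
  induction fuel with
  | zero => intro stack seen _ hseen w hw; exact hseen w (by simpa [pvLoop] using hw)
  | succ f ih =>
    intro stack seen hstack hseen w hw
    cases stack with
    | nil => exact hseen w (by simpa [pvLoop] using hw)
    | cons u stack =>
      simp only [pvLoop] at hw
      have hu : Relation.ReflTransGen (pvR adj) start u := hstack u List.mem_cons_self
      have H := pvFoldlPresMem
        (fun (p : List (Int × Int) × PySem.Set (Int × Int)) v =>
          if p.2.contains v then p else (v :: p.1, p.2.add v))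
        (fun p => (∀ s ∈ p.1, Relation.ReflTransGen (pvR adj) start s) ∧
                  (∀ x ∈ p.2, Relation.ReflTransGen (pvR adj) start x))
        (fun v => pvR adj u v)
        ?_ (adj.getD u []) (fun v hv => hv) (stack, seen)
        ⟨fun s hs => hstack s (List.mem_cons_of_mem _ hs), hseen⟩
      · exact ih _ _ H.1 H.2 w hw
      · intro a x hQ hP
        dsimp only
        by_cases hc : a.2.contains x
        · rwa [if_pos hc]
        · rw [if_neg hc]
          have hx : Relation.ReflTransGen (pvR adj) start x := hu.tail hQ
          refine ⟨?_, ?_⟩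
          · intro s hs
            rcases List.mem_cons.mp hs with h | h
            · exact h ▸ hx
            · exact hP.1 s h
          · intro y hy
            rw [PySem.Set.mem_add] at hy
            rcases hy with h | h
            · exact hP.2 y h
            · exact h ▸ hx

theorem pvLoop_fold_facts (adj : PySem.Dict (Int × Int) (List (Int × Int)))
    (nodes : Finset (Int × Int)) (hnbrN : ∀ a b, pvR adj a b → b ∈ nodes) (u : Int × Int) :
    ∀ (l : List (Int × Int)) (p : List (Int × Int) × PySem.Set (Int × Int)),
      (∀ v ∈ l, pvR adj u v) →
      (∀ w ∈ p.2, w ∈ nodes) →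
      p.2.Nodup →
      ((∀ x ∈ p.2, x ∈ (l.foldl (fun p v => if p.2.contains v then p else (v :: p.1, p.2.add v)) p).2) ∧
       (∀ x ∈ p.1, x ∈ (l.foldl (fun p v => if p.2.contains v then p else (v :: p.1, p.2.add v)) p).1) ∧
       ((l.foldl (fun p v => if p.2.contains v then p else (v :: p.1, p.2.add v)) p).2.Nodup) ∧
       (∀ w ∈ (l.foldl (fun p v => if p.2.contains v then p else (v :: p.1, p.2.add v)) p).2, w ∈ nodes) ∧
       (∀ v ∈ l, v ∈ (l.foldl (fun p v => if p.2.contains v then p else (v :: p.1, p.2.add v)) p).2) ∧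
       (∀ w ∈ (l.foldl (fun p v => if p.2.contains v then p else (v :: p.1, p.2.add v)) p).2,
          w ∈ p.2 ∨ w ∈ (l.foldl (fun p v => if p.2.contains v then p else (v :: p.1, p.2.add v)) p).1) ∧
       (∀ s ∈ (l.foldl (fun p v => if p.2.contains v then p else (v :: p.1, p.2.add v)) p).1,
          s ∈ p.1 ∨ s ∈ (l.foldl (fun p v => if p.2.contains v then p else (v :: p.1, p.2.add v)) p).2) ∧
       ((l.foldl (fun p v => if p.2.contains v then p else (v :: p.1, p.2.add v)) p).1.length
          + 2 * (nodes \ (l.foldl (fun p v => if p.2.contains v then p else (v :: p.1, p.2.add v)) p).2.toFinset).card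
          ≤ p.1.length + 2 * (nodes \ p.2.toFinset).card)) := by
  intro l
  induction l with
  | nil =>
    intro p _ hN hnd
    simp only [List.foldl_nil]
    exact ⟨fun x hx => hx, fun x hx => hx, hnd, hN, by simp, fun w hw => Or.inl hw,
      fun s hs => Or.inl hs, le_refl _⟩
  | cons v t iht =>
    intro p hl hN hnd
    simp only [List.foldl_cons]
    by_cases hc : p.2.contains v
    · rw [if_pos hc]
      have hv : v ∈ p.2 := (PySem.Set.contains_iff p.2 v).mp hc
      obtain ⟨c1, c2, c3, c4, c5, c6, c7, c8⟩ :=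
        iht p (fun v' hv' => hl v' (List.mem_cons_of_mem _ hv')) hN hnd
      refine ⟨c1, c2, c3, c4, ?_, c6, c7, c8⟩
      intro v' hv'
      rcases List.mem_cons.mp hv' with h | h
      · exact h ▸ c1 v hv
      · exact c5 v' h
    · rw [if_neg hc]
      have hvp2 : v ∉ p.2 := fun h => hc ((PySem.Set.contains_iff p.2 v).mpr h)
      have hpvR : pvR adj u v := hl v List.mem_cons_self
      have hvN : v ∈ nodes := hnbrN u v hpvR
      obtain ⟨c1, c2, c3, c4, c5, c6, c7, c8⟩ :=
        iht (v :: p.1, p.2.add v) (fun v' hv' => hl v' (List.mem_cons_of_mem _ hv'))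
          (by
            intro w hw
            rcases (PySem.Set.mem_add p.2 v w).mp hw with h | h
            · exact hN w h
            · exact h ▸ hvN)
          (PySem.Set.nodup_add p.2 v hnd)
      have hvadd : v ∈ p.2.add v := (PySem.Set.mem_add p.2 v v).mpr (Or.inr rfl)
      refine ⟨?_, ?_, c3, c4, ?_, ?_, ?_, ?_⟩
      · intro x hx; exact c1 x ((PySem.Set.mem_add p.2 v x).mpr (Or.inl hx))
      · intro x hx; exact c2 x (List.mem_cons_of_mem _ hx)
      · intro v' hv'
        rcases List.mem_cons.mp hv' with h | h
        · exact h ▸ c1 v hvadd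
        · exact c5 v' h
      · intro w hw
        rcases c6 w hw with h | h
        · rcases (PySem.Set.mem_add p.2 v w).mp h with h' | h'
          · exact Or.inl h'
          · exact Or.inr (c2 w (h' ▸ List.mem_cons_self))
        · exact Or.inr h
      · intro s hs
        rcases c7 s hs with h | h
        · rcases List.mem_cons.mp h with h' | h'
          · exact Or.inr (c1 s (h' ▸ hvadd))
          · exact Or.inl h'
        · exact Or.inr h
      · have hvsd : v ∈ nodes \ p.2.toFinset := by
          rw [Finset.mem_sdiff, List.mem_toFinset]
          exact ⟨hvN, hvp2⟩
        have hpos : 0 < (nodes \ p.2.toFinset).card := Finset.card_pos.mpr ⟨v, hvsd⟩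
        have heq : nodes \ (p.2.add v).toFinset = (nodes \ p.2.toFinset).erase v := by
          rw [pvSetAdd_toFinset]
          ext a
          simp only [Finset.mem_sdiff, Finset.mem_insert, Finset.mem_erase]
          tauto
        have hcarderase : (nodes \ (p.2.add v).toFinset).card = (nodes \ p.2.toFinset).card - 1 := by
          rw [heq, Finset.card_erase_of_mem hvsd]
        refine le_trans c8 ?_
        simp only [List.length_cons, hcarderase]
        omega

theorem pvLoop_closed (adj : PySem.Dict (Int × Int) (List (Int × Int))) (nodes : Finset (Int × Int))
    (hnbr : ∀ a b, pvR adj a b → b ∈ nodes) :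
    ∀ (fuel : Nat) (stack : List (Int × Int)) (seen : PySem.Set (Int × Int)),
      (∀ s ∈ stack, s ∈ seen) →
      (∀ w ∈ seen, w ∈ stack ∨ (∀ v, pvR adj w v → v ∈ seen)) →
      seen.Nodup →
      (∀ w ∈ seen, w ∈ nodes) →
      stack.length + 2 * (nodes \ seen.toFinset).card < fuel →
      ∀ w ∈ pvLoop adj fuel stack seen, ∀ v, pvR adj w v → v ∈ pvLoop adj fuel stack seen := by
  intro fuel
  induction fuel with
  | zero => intro stack seen _ _ _ _ hf; omega
  | succ f ih =>
    intro stack seen hss hinv hnd hN hf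
    cases stack with
    | nil =>
      intro w hw v hv
      simp only [pvLoop] at hw ⊢
      rcases hinv w hw with h | h
      · simp at h
      · exact h v hv
    | cons u stack =>
      simp only [pvLoop]
      obtain ⟨c1, c2, c3, c4, c5, c6, c7, c8⟩ :=
        pvLoop_fold_facts adj nodes hnbr u (adj.getD u []) (stack, seen)
          (fun v hv => hv) hN hnd
      refine ih _ _ ?_ ?_ c3 c4 ?_
      · intro s hs
        rcases c7 s hs with h | h
        · exact c1 s (hss s (List.mem_cons_of_mem _ h))
        · exact h
      · intro w hw
        rcases c6 w hw with h | h
        · rcases hinv w h with h' | h'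
          · rcases List.mem_cons.mp h' with h'' | h''
            · subst h''
              exact Or.inr (fun v hv => c5 v hv)
            · exact Or.inl (c2 w h'')
          · exact Or.inr (fun v hv => c1 v (h' v hv))
        · exact Or.inl h
      · simp only [List.length_cons] at hf
        dsimp only at c8
        omega

theorem pvStepA_getD (d : PySem.Dict (Int × Int) (List (Int × Int)))
    (e : ((Int × Int) × (Int × Int)) × Int) (u : Int × Int) :
    ((if 0 < e.2 then
        (d.modify e.1.1 [] (fun l => l ++ [e.1.2])).modify e.1.2 [] (fun l => l ++ [e.1.1])
      else d)).getD u []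
    = d.getD u [] ++ (if 0 < e.2 then
        ((if e.1.1 = u then [e.1.2] else []) ++ (if e.1.2 = u then [e.1.1] else [])) else []) := by
  by_cases hpos : 0 < e.2
  · rw [if_pos hpos, if_pos hpos, PySem.Dict.getD_modify]
    by_cases h2 : u = e.1.2
    · rw [if_pos h2, PySem.Dict.getD_modify]
      by_cases h1 : e.1.2 = e.1.1
      · rw [if_pos h1]
        have hu1 : e.1.1 = u := (h2.trans h1).symm
        have hu2 : e.1.2 = u := h2.symm
        rw [if_pos hu1, if_pos hu2, ← hu1, h1]
        simp
      · rw [if_neg h1]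
        have hu1 : ¬ (e.1.1 = u) := fun h => h1 ((h.trans h2).symm)
        have hu2 : e.1.2 = u := h2.symm
        rw [if_neg hu1, if_pos hu2, List.nil_append, ← hu2]
    · rw [if_neg h2, PySem.Dict.getD_modify]
      by_cases h1 : u = e.1.1
      · rw [if_pos h1]
        have hu1 : e.1.1 = u := h1.symm
        have hu2 : ¬ (e.1.2 = u) := fun h => h2 h.symm
        rw [if_pos hu1, if_neg hu2, List.append_nil, ← hu1]
      · rw [if_neg h1]
        have hu1 : ¬ (e.1.1 = u) := fun h => h1 h.symm
        have hu2 : ¬ (e.1.2 = u) := fun h => h2 h.symm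
        rw [if_neg hu1, if_neg hu2]
        simp
  · rw [if_neg hpos, if_neg hpos, List.append_nil]

theorem pvGraphA_getD (l : List (((Int × Int) × (Int × Int)) × Int)) (u : Int × Int) :
    ∀ (d : PySem.Dict (Int × Int) (List (Int × Int))),
    (l.foldl (fun g e =>
      if 0 < e.2 then
        (g.modify e.1.1 [] (fun l => l ++ [e.1.2])).modify e.1.2 [] (fun l => l ++ [e.1.1])
      else g) d).getD u []
    = d.getD u [] ++ pvPartners u l := by
  induction l with
  | nil => intro d; simp [pvPartners]
  | cons e t ih =>
    intro d
    rw [List.foldl_cons, ih, pvStepA_getD]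
    simp [pvPartners, List.flatMap_cons]

theorem pvGraph0_getD (ks : List (Int × Int)) (u : Int × Int) :
    (PySem.Dict.ofList (ks.map (fun i => (i, ([] : List (Int × Int)))))).getD u [] = [] := by
  have : ∀ (l : List ((Int × Int) × List (Int × Int))) (d : PySem.Dict (Int × Int) (List (Int × Int))),
      (∀ p ∈ l, p.2 = []) → d.getD u [] = [] →
      (l.foldl (fun d p => d.insert p.1 p.2) d).getD u [] = [] := by
    intro l
    induction l with
    | nil => intro d _ h; exact h
    | cons p t ih =>
      intro d hl h
      rw [List.foldl_cons]
      refine ih _ (fun q hq => hl q (List.mem_cons_of_mem _ hq)) ?_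
      rw [PySem.Dict.getD_insert]
      split
      · exact hl p List.mem_cons_self
      · exact h
  exact this _ _ (by simp) rfl

theorem pvPartners_mem (l : List (((Int × Int) × (Int × Int)) × Int)) (u v : Int × Int) :
    v ∈ pvPartners u l ↔ pvNbrSpec l u v := by
  simp only [pvPartners, pvNbrSpec, List.mem_flatMap]
  constructor
  · rintro ⟨e, he, hv⟩
    split at hv
    · rcases List.mem_append.mp hv with h | h
      · split at h
        · simp only [List.mem_singleton] at h
          exact ⟨e, he, by assumption, Or.inl ⟨by assumption, h.symm⟩⟩
        · simp at h
      · split at h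
        · simp only [List.mem_singleton] at h
          exact ⟨e, he, by assumption, Or.inr ⟨by assumption, h.symm⟩⟩
        · simp at h
    · simp at hv
  · rintro ⟨e, he, hpos, h | h⟩
    · exact ⟨e, he, by rw [if_pos hpos]; simp [h.1, h.2]⟩
    · refine ⟨e, he, ?_⟩
      rw [if_pos hpos]
      rcases h with ⟨h1, h2⟩
      refine List.mem_append.mpr (Or.inr ?_)
      rw [if_pos h1]
      exact List.mem_singleton.mpr h2.symm

theorem pvMemFilterMap (L : List ((Int × Int) × (Int × Int))) (u v : Int × Int) :
    (v ∈ (L.filter (fun p => p.1 == u)).map (fun x => x.2)) ↔ (u, v) ∈ L := by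
  simp only [List.mem_map, List.mem_filter, beq_iff_eq]
  constructor
  · rintro ⟨⟨a, b⟩, ⟨hp, h1⟩, h2⟩
    dsimp at h1 h2
    rw [← h1, ← h2]
    exact hp
  · intro h
    exact ⟨(u, v), ⟨h, rfl⟩, rfl⟩

theorem pvAdjB_mem (items : List (((Int × Int) × (Int × Int)) × Int)) (u v : Int × Int) :
    (v ∈ (((((items.filter (fun e => 0 < e.2)).map (fun e => e.1)) ++
        ((items.filter (fun e => 0 < e.2)).map (fun e => e.1)).map (fun e => (e.2, e.1))).foldl
        (fun d p => d.modify p.1 [] (fun l => l ++ [p.2])) PySem.Dict.empty).getD u []))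
      ↔ pvNbrSpec items u v := by
  rw [PySem.Dict.getD_foldl_modify_append]
  have h0 : (PySem.Dict.empty : PySem.Dict (Int × Int) (List (Int × Int))).getD u [] = [] := rfl
  rw [h0, List.nil_append, pvMemFilterMap]
  simp only [List.mem_append, List.mem_map, List.mem_filter, pvNbrSpec, decide_eq_true_eq]
  constructor
  · rintro (⟨e, ⟨he, hpos⟩, heq⟩ | ⟨q, ⟨e, ⟨he, hpos⟩, heq⟩, hsw⟩)
    · exact ⟨e, he, hpos, Or.inl ⟨by rw [heq], by rw [heq]⟩⟩
    · rw [← heq, Prod.mk.injEq] at hsw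
      exact ⟨e, he, hpos, Or.inr ⟨hsw.1, hsw.2⟩⟩
  · rintro ⟨e, he, hpos, ⟨h1, h2⟩ | ⟨h1, h2⟩⟩
    · exact Or.inl ⟨e, ⟨he, hpos⟩, Prod.ext h1 h2⟩
    · exact Or.inr ⟨e.1, ⟨e, ⟨he, hpos⟩, rfl⟩, Prod.ext h1 h2⟩


theorem pvFoldlAdd_length_le : ∀ (xs : List (Int × Int)) (s : PySem.Set (Int × Int)),
    (xs.foldl PySem.Set.add s).length ≤ s.length + xs.length := by
  intro xs
  induction xs with
  | nil => intro s; simp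
  | cons x t ih =>
    intro s
    rw [List.foldl_cons]
    refine le_trans (ih _) ?_
    have h : (s.add x).length ≤ s.length + 1 := by
      unfold PySem.Set.add
      split
      · omega
      · simp
    simp only [List.length_cons]
    omega

theorem pvOfList_length_le (xs : List (Int × Int)) :
    (PySem.Set.ofList xs).length ≤ xs.length := by
  have h := pvFoldlAdd_length_le xs []
  rw [show PySem.Set.ofList xs = xs.foldl PySem.Set.add [] from rfl]
  simpa using h

-- ===== VERDICT (by name: the statement is the Claim_ definition above) =====
theorem check_connect_spec : Claim_equal_check_connect := by
  unfold Claim_equal_check_connect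
  intro solution islands _ hPre
  unfold Spec_check_connect
  obtain ⟨hne, hkeysPre⟩ := hPre
  simp only [check_connect, check_connect_alt]
  have hkeys : (PySem.Dict.ofList (pvPairs islands)).keys
      = PySem.List.dedup (islands.map (fun e => (e.1, e.2.1))) := by
    rw [show (PySem.Dict.ofList (pvPairs islands))
        = (pvPairs islands).foldl (fun d p => d.insert p.1 p.2) PySem.Dict.empty from rfl]
    rw [PySem.Dict.keys_foldl_insert_key (pvPairs islands) (fun p => p.1) (fun _ p => p.2) PySem.Dict.empty]
    rw [PySem.List.dedup_eq_ofList]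
    have : (pvPairs islands).map (fun p => p.1) = islands.map (fun e => (e.1, e.2.1)) := by
      simp [pvPairs]
    rw [this]
    rfl
  rw [hkeys]
  cases hmin : PySem.List.min2? (PySem.List.dedup (islands.map (fun e => (e.1, e.2.1))))
      (fun k => k.1) (fun k => k.2) with
  | none => rfl
  | some start =>
    -- abbreviations
    have hstartK : start ∈ PySem.List.dedup (islands.map (fun e => (e.1, e.2.1))) :=
      pvMin2?_mem _ _ _ _ hmin
    -- the two adjacency structures agree with pvNbrSpec
    have hgA : ∀ u v, pvR ((PySem.Dict.ofList (pvSolPairs solution)).items.foldl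
        (fun g e =>
          if 0 < e.2 then
            (g.modify e.1.1 [] (fun l => l ++ [e.1.2])).modify e.1.2 [] (fun l => l ++ [e.1.1])
          else g)
        (PySem.Dict.ofList ((PySem.List.dedup (islands.map (fun e => (e.1, e.2.1)))).map
          (fun i => (i, ([] : List (Int × Int))))))) u v
        ↔ pvNbrSpec (PySem.Dict.ofList (pvSolPairs solution)).items u v := by
      intro u v
      unfold pvR
      rw [pvGraphA_getD, pvGraph0_getD, List.nil_append]
      exact pvPartners_mem _ u v
    have hgB : ∀ u v, pvR (((((PySem.Dict.ofList (pvSolPairs solution)).items.filter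
          (fun e => 0 < e.2)).map (fun e => e.1)) ++
          (((PySem.Dict.ofList (pvSolPairs solution)).items.filter
          (fun e => 0 < e.2)).map (fun e => e.1)).map (fun e => (e.2, e.1))).foldl
          (fun d p => d.modify p.1 [] (fun l => l ++ [p.2])) PySem.Dict.empty) u v
        ↔ pvNbrSpec (PySem.Dict.ofList (pvSolPairs solution)).items u v := by
      intro u v
      exact pvAdjB_mem _ u v
    -- node bound
    have hspecN : ∀ a b, pvNbrSpec (PySem.Dict.ofList (pvSolPairs solution)).items a b →
        b ∈ (PySem.List.dedup (islands.map (fun e => (e.1, e.2.1)))).toFinset := by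
      intro a b h
      rcases h with ⟨e, he, hpos, hc⟩
      rcases hkeysPre e he hpos with ⟨h1, h2⟩
      rw [List.mem_toFinset, PySem.List.dedup_eq_ofList, PySem.Set.mem_ofList]
      rcases hc with ⟨_, hb⟩ | ⟨_, hb⟩
      · exact hb ▸ h2
      · exact hb ▸ h1
    have hstartN : start ∈ (PySem.List.dedup (islands.map (fun e => (e.1, e.2.1)))).toFinset :=
      List.mem_toFinset.mpr hstartK
    have hcardK : (PySem.List.dedup (islands.map (fun e => (e.1, e.2.1)))).toFinset.card
        ≤ islands.length := by
      calc (PySem.List.dedup (islands.map (fun e => (e.1, e.2.1)))).toFinset.card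
          ≤ (PySem.List.dedup (islands.map (fun e => (e.1, e.2.1)))).length :=
            List.toFinset_card_le _
        _ ≤ (islands.map (fun e => (e.1, e.2.1))).length := by
            rw [PySem.List.dedup_eq_ofList]
            exact pvOfList_length_le _
        _ = islands.length := List.length_map ..
    -- generalize the two structures
    generalize hG : (PySem.Dict.ofList (pvSolPairs solution)).items.foldl
        (fun g e =>
          if 0 < e.2 then
            (g.modify e.1.1 [] (fun l => l ++ [e.1.2])).modify e.1.2 [] (fun l => l ++ [e.1.1])
          else g)
        (PySem.Dict.ofList ((PySem.List.dedup (islands.map (fun e => (e.1, e.2.1)))).map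
          (fun i => (i, ([] : List (Int × Int)))))) = G at *
    generalize hAdj : (((((PySem.Dict.ofList (pvSolPairs solution)).items.filter
          (fun e => 0 < e.2)).map (fun e => e.1)) ++
          (((PySem.Dict.ofList (pvSolPairs solution)).items.filter
          (fun e => 0 < e.2)).map (fun e => e.1)).map (fun e => (e.2, e.1))).foldl
          (fun d p => d.modify p.1 [] (fun l => l ++ [p.2])) PySem.Dict.empty) = Adj at *
    have hnbrA : ∀ a b, pvR G a b →
        b ∈ (PySem.List.dedup (islands.map (fun e => (e.1, e.2.1)))).toFinset :=
      fun a b h => hspecN a b ((hgA a b).mp h)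
    have hnbrB : ∀ a b, pvR Adj a b →
        b ∈ (PySem.List.dedup (islands.map (fun e => (e.1, e.2.1)))).toFinset :=
      fun a b h => hspecN a b ((hgB a b).mp h)
    have hseen0 : (PySem.Set.add PySem.Set.empty start) = [start] := rfl
    -- SA facts
    have hSAnodup : (pvDfs G (islands.length + 1) start PySem.Set.empty).Nodup :=
      pvDfs_nodup G _ start _ List.nodup_nil
    have hSAstart : start ∈ pvDfs G (islands.length + 1) start PySem.Set.empty :=
      pvDfs_mem_self G _ start _ (by omega)
    have hSAsound : ∀ w ∈ pvDfs G (islands.length + 1) start PySem.Set.empty,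
        Relation.ReflTransGen (pvR G) start w := by
      intro w hw
      rcases pvDfs_sound G _ start _ w hw with h | h
      · simp [PySem.Set.empty] at h
      · exact h
    have hcardA : ((PySem.List.dedup (islands.map (fun e => (e.1, e.2.1)))).toFinset
        \ insert start (PySem.Set.empty : PySem.Set (Int × Int)).toFinset).card
        < islands.length + 1 := by
      have hsub : (PySem.List.dedup (islands.map (fun e => (e.1, e.2.1)))).toFinset
          \ insert start (PySem.Set.empty : PySem.Set (Int × Int)).toFinset
          ⊆ (PySem.List.dedup (islands.map (fun e => (e.1, e.2.1)))).toFinset :=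
        Finset.sdiff_subset
      have := Finset.card_le_card hsub
      omega
    have hSAclosed : ∀ w ∈ pvDfs G (islands.length + 1) start PySem.Set.empty,
        ∀ v, pvR G w v → v ∈ pvDfs G (islands.length + 1) start PySem.Set.empty := by
      intro w hw v hv
      rcases pvDfs_closed G _ hnbrA _ start _ hstartN (by simp [PySem.Set.empty]) hcardA w hw with
        h | h
      · simp [PySem.Set.empty] at h
      · exact h v hv
    -- SB facts
    have hSBnodup : (pvLoop Adj (2 * islands.length + 2) [start]
        (PySem.Set.add PySem.Set.empty start)).Nodup :=
      pvLoop_nodup Adj _ _ _ (by rw [hseen0]; exact List.nodup_singleton start)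
    have hSBstart : start ∈ pvLoop Adj (2 * islands.length + 2) [start]
        (PySem.Set.add PySem.Set.empty start) :=
      pvLoop_subset Adj _ _ _ start (by rw [hseen0]; exact List.mem_singleton.mpr rfl)
    have hSBsound : ∀ w ∈ pvLoop Adj (2 * islands.length + 2) [start]
        (PySem.Set.add PySem.Set.empty start), Relation.ReflTransGen (pvR Adj) start w := by
      refine pvLoop_sound Adj start _ _ _ ?_ ?_
      · intro s hs
        rw [List.mem_singleton] at hs
        exact hs ▸ Relation.ReflTransGen.refl
      · intro w hw
        rw [hseen0, List.mem_singleton] at hw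
        exact hw ▸ Relation.ReflTransGen.refl
    have hcardB : (1 : Nat) + 2 * (((PySem.List.dedup (islands.map (fun e => (e.1, e.2.1)))).toFinset
        \ (PySem.Set.add PySem.Set.empty start).toFinset).card) < 2 * islands.length + 2 := by
      have hsub : (PySem.List.dedup (islands.map (fun e => (e.1, e.2.1)))).toFinset
          \ (PySem.Set.add PySem.Set.empty start).toFinset
          ⊆ (PySem.List.dedup (islands.map (fun e => (e.1, e.2.1)))).toFinset :=
        Finset.sdiff_subset
      have := Finset.card_le_card hsub
      omega
    have hSBclosed : ∀ w ∈ pvLoop Adj (2 * islands.length + 2) [start]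
        (PySem.Set.add PySem.Set.empty start), ∀ v, pvR Adj w v →
        v ∈ pvLoop Adj (2 * islands.length + 2) [start] (PySem.Set.add PySem.Set.empty start) := by
      refine pvLoop_closed Adj _ hnbrB _ _ _ ?_ ?_ ?_ ?_ ?_
      · intro s hs
        rw [List.mem_singleton] at hs
        rw [hseen0, hs]
        exact List.mem_singleton.mpr rfl
      · intro w hw
        rw [hseen0] at hw
        exact Or.inl hw
      · rw [hseen0]; exact List.nodup_singleton start
      · intro w hw
        rw [hseen0, List.mem_singleton] at hw
        exact hw ▸ hstartN
      · simpa using hcardB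
    -- the relations coincide
    have hRR : ∀ a b, pvR G a b ↔ pvR Adj a b :=
      fun a b => (hgA a b).trans ((hgB a b).symm)
    -- membership equivalence
    have hmemiff : ∀ w, w ∈ pvDfs G (islands.length + 1) start PySem.Set.empty ↔
        w ∈ pvLoop Adj (2 * islands.length + 2) [start] (PySem.Set.add PySem.Set.empty start) := by
      intro w
      constructor
      · intro hw
        have hR : Relation.ReflTransGen (pvR Adj) start w :=
          (hSAsound w hw).mono (fun {a b} h => (hRR a b).mp h)
        clear hw
        induction hR with
        | refl => exact hSBstart
        | tail _ hbc ih => exact hSBclosed _ ih _ hbc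
      · intro hw
        have hR : Relation.ReflTransGen (pvR G) start w :=
          (hSBsound w hw).mono (fun {a b} h => (hRR a b).mpr h)
        clear hw
        induction hR with
        | refl => exact hSAstart
        | tail _ hbc ih => exact hSAclosed _ ih _ hbc
    have hlen : (pvDfs G (islands.length + 1) start PySem.Set.empty).length
        = (pvLoop Adj (2 * islands.length + 2) [start]
            (PySem.Set.add PySem.Set.empty start)).length :=
      ((List.perm_ext_iff_of_nodup hSAnodup hSBnodup).mpr hmemiff).length_eq
    have hsize : (PySem.Dict.ofList (pvPairs islands)).size
        = (PySem.List.dedup (islands.map (fun e => (e.1, e.2.1)))).length := by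
      rw [← hkeys]
      simp [PySem.Dict.size, PySem.Dict.keys]
    rw [decide_eq_decide, hlen, hsize]
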